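-- pv_equiv track=rewrite | github.com/RaulDiazR/SAIS-Project | sais.py | obtenerBuckets
-- ===== SOURCE A (Python) =====
-- def obtenerBuckets(T):
--     count = {}  # Un diccionario para contar la ocurrencia de cada carácter
--     buckets = {}  # Un diccionario para almacenar los rangos (buckets) de cada carácter
--     for c in T:
--         count[c] = count.get(c, 0) + 1  # Se cuentan las ocurrencias de cada carácter
--     start = 0
--     for c in sorted(count.keys()):  # Se ordenan los caracteres
--         buckets[c] = (start, start + count[c])  # Se asigna un rango (bucket) a cada carácter
--         start += count[c]  # Se actualiza la posición de inicio para el siguiente carácter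
--     return buckets
-- ===== SOURCE B (Python) =====
-- def obtenerBuckets(T):
--     s = sorted(T)
--     buckets = {}
--     start = 0
--     while s:
--         c = s[0]
--         n = 1
--         while n < len(s) and s[n] == c:
--             n += 1
--         buckets[c] = (start, start + n)
--         start += n
--         s = s[n:]
--     return buckets
-- ===== Notes on version B (the rewrite author's own statement) =====
-- stated objective: alternative
-- what changed: B sorts the full character list and emits buckets by run-length grouping of equal runs with a running start, instead of counting occurrences into a dict and then iterating sorted distinct keys.
import Mathlib
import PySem

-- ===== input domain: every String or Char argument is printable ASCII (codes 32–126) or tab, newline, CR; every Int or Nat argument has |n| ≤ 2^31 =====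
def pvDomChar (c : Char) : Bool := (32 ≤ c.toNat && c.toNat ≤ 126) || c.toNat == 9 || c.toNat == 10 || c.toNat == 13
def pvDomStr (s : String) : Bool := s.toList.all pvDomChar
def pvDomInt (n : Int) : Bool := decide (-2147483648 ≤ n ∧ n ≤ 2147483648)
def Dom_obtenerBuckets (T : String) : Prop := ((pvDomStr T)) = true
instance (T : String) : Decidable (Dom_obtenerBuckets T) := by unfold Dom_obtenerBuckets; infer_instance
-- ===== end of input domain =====

-- B replaces A's count-dict-then-sorted-keys pass by sorting all characters and
-- run-length grouping the sorted list with a running start (alternative decomposition).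
-- Python dict keys are 1-character strings; both ports keep Char keys internally and emit
-- String.ofList [c] in the output, which is exact since single-character ASCII strings
-- compare exactly as their characters.

-- ===== PORT A =====
def obtenerBuckets (T : String) : List (String × Int × Int) :=
  -- count[c] = count.get(c, 0) + 1 over T
  let count : PySem.Dict Char Int :=
    T.toList.foldl (fun d c => d.insert c (d.getD c 0 + 1)) PySem.Dict.empty
  -- for c in sorted(count.keys()): buckets[c] = (start, start+count[c]); start += count[c]
  (((PySem.List.sorted count.keys (fun x => x) false).foldl
      (fun (acc : List (String × Int × Int) × Int) c =>
        let n := count.getD c 0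
        (acc.1 ++ [(String.ofList [c], acc.2, acc.2 + n)], acc.2 + n))
      ([], 0))).1

-- ===== PORT B =====
-- inner while loop: n = length of the maximal run of c at the front; then s = s[n:]
def pvGroupRuns (start : Int) (s : List Char) : List (String × Int × Int) :=
  match s with
  | [] => []
  | c :: cs =>
    let n : Int := ((cs.takeWhile (fun x => x == c)).length : Int) + 1
    (String.ofList [c], start, start + n) ::
      pvGroupRuns (start + n) (cs.dropWhile (fun x => x == c))
termination_by s.length
decreasing_by
  simp only [List.length_cons]
  exact Nat.lt_succ_of_le (List.length_dropWhile_le _ _)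

def obtenerBuckets_alt (T : String) : List (String × Int × Int) :=
  pvGroupRuns 0 (PySem.List.sorted T.toList (fun x => x) false)

-- ===== PRECONDITION & SPEC =====
def Spec_obtenerBuckets (T : String) (out : List (String × Int × Int)) : Prop := out = obtenerBuckets_alt T
instance (T : String) (out : List (String × Int × Int)) : Decidable (Spec_obtenerBuckets T out) := by unfold Spec_obtenerBuckets; infer_instance

-- ===== CLAIM (what is proved, stated in full; the proofs are below) =====
def Claim_equal_obtenerBuckets : Prop := ∀ (T : String), Dom_obtenerBuckets T → Spec_obtenerBuckets T (obtenerBuckets T)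

-- ===== LEMMAS AND PROOFS =====

-- common skeleton: emit one triple per key, advancing start by n c
def pvBuild (n : Char → Nat) : List Char → Int → List (String × Int × Int)
  | [], _ => []
  | c :: cs, start =>
    (String.ofList [c], start, start + (n c : Int)) :: pvBuild n cs (start + (n c : Int))

lemma pvFoldA_eq (n : Char → Nat) : ∀ (ks : List Char) (acc : List (String × Int × Int)) (start : Int),
    (ks.foldl
      (fun (a : List (String × Int × Int) × Int) c =>
        (a.1 ++ [(String.ofList [c], a.2, a.2 + (n c : Int))], a.2 + (n c : Int)))
      (acc, start)).1 = acc ++ pvBuild n ks start := by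
  intro ks
  induction ks with
  | nil => intro acc start; simp [pvBuild]
  | cons c cs ih =>
    intro acc start
    simp only [List.foldl_cons, pvBuild, ih]
    simp [List.append_assoc]

lemma pvGroup_eq (n : Char → Nat) : ∀ (ks : List Char) (start : Int),
    ks.Pairwise (· < ·) → (∀ c ∈ ks, 0 < n c) →
    pvGroupRuns start (ks.flatMap fun c => List.replicate (n c) c) = pvBuild n ks start := by
  intro ks
  induction ks with
  | nil => intro start _ _; simp [pvGroupRuns, pvBuild]
  | cons c cs ih =>
    intro start hpw hpos
    have hc : 0 < n c := hpos c (List.mem_cons_self ..)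
    have hrep : List.replicate (n c) c = c :: List.replicate (n c - 1) c := by
      rw [← List.replicate_succ]; congr 1; omega
    have hrest : ∀ x, (cs.flatMap fun k => List.replicate (n k) k) = x :: _root_.id (cs.flatMap fun k => List.replicate (n k) k) → False := by
      intro x; exact fun h => absurd h (by simp [_root_.id])
    -- the head of the next block differs from c
    have hhead : ∀ d l, (cs.flatMap fun k => List.replicate (n k) k) = d :: l → (d == c) = false := by
      intro d l h
      have hd : d ∈ cs.flatMap fun k => List.replicate (n k) k := by rw [h]; exact List.mem_cons_self ..
      rw [List.mem_flatMap] at hd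
      obtain ⟨k, hk, hdk⟩ := hd
      have : d = k := List.eq_of_mem_replicate hdk
      subst this
      have : c < d := (List.pairwise_cons.mp hpw).1 d hk
      simp [ne_of_gt this]
    have htake : ((List.replicate (n c - 1) c ++ cs.flatMap fun k => List.replicate (n k) k).takeWhile (fun x => x == c))
        = List.replicate (n c - 1) c := by
      rw [List.takeWhile_append]
      simp only [List.takeWhile_replicate, beq_self_eq_true, List.length_replicate]
      cases h : cs.flatMap fun k => List.replicate (n k) k with
      | nil => simp
      | cons d l => simp [hhead d l h]
    have hdrop : ((List.replicate (n c - 1) c ++ cs.flatMap fun k => List.replicate (n k) k).dropWhile (fun x => x == c))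
        = cs.flatMap fun k => List.replicate (n k) k := by
      rw [List.dropWhile_append]
      simp only [List.dropWhile_replicate, beq_self_eq_true]
      cases h : cs.flatMap fun k => List.replicate (n k) k with
      | nil => simp
      | cons d l => simp [hhead d l h]
    have hn : ((List.replicate (n c - 1) c).length : Int) + 1 = (n c : Int) := by
      simp only [List.length_replicate]; omega
    rw [List.flatMap_cons, hrep]
    rw [show (c :: List.replicate (n c - 1) c ++ cs.flatMap fun k => List.replicate (n k) k)
        = c :: (List.replicate (n c - 1) c ++ cs.flatMap fun k => List.replicate (n k) k) by simp]
    rw [pvGroupRuns]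
    simp only [htake, hdrop, hn, pvBuild]
    exact congrArg _ (ih _ (List.pairwise_cons.mp hpw).2
      (fun k hk => hpos k (List.mem_cons_of_mem _ hk)))

lemma pvCount_flatten (L : List Char) : ∀ (ks : List Char), ks.Nodup →
    (∀ c ∈ ks, c ∈ L) →
    ∀ c, (ks.flatMap fun k => List.replicate (L.count k) k).count c
      = if c ∈ ks then L.count c else 0 := by
  intro ks
  induction ks with
  | nil => simp
  | cons k kt ih =>
    intro hnd hmem c
    simp only [List.flatMap_cons, List.count_append, List.count_replicate]
    rw [ih hnd.of_cons (fun x hx => hmem x (List.mem_cons_of_mem _ hx))]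
    by_cases hck : c = k
    · subst hck
      have : c ∉ kt := (List.nodup_cons.mp hnd).1
      simp [this]
    · simp only [List.mem_cons]
      by_cases hm : c ∈ kt <;> simp [hck, hm, Ne.symm hck]

lemma pvFlatten_perm (L : List Char) :
    (((PySem.List.sorted (PySem.Set.ofList L) (fun x => x) false)).flatMap
      fun k => List.replicate (L.count k) k).Perm L := by
  rw [List.perm_iff_count]
  intro c
  have hnd : (PySem.List.sorted (PySem.Set.ofList L) (fun x => x) false).Nodup := by
    have := PySem.List.sorted_ofList_pairwise_lt (xs := L)
    exact this.imp (fun h => ne_of_lt h)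
  have hmem : ∀ x ∈ PySem.List.sorted (PySem.Set.ofList L) (fun x => x) false, x ∈ L := by
    intro x hx
    rw [PySem.List.mem_sorted] at hx
    exact (PySem.Set.mem_ofList _ _).mp hx
  rw [pvCount_flatten L _ hnd hmem c]
  by_cases h : c ∈ L
  · have : c ∈ PySem.List.sorted (PySem.Set.ofList L) (fun x => x) false := by
      rw [PySem.List.mem_sorted]; exact (PySem.Set.mem_ofList _ _).mpr h
    simp [this]
  · have : c ∉ PySem.List.sorted (PySem.Set.ofList L) (fun x => x) false := by
      rw [PySem.List.mem_sorted]; exact fun hx => h ((PySem.Set.mem_ofList _ _).mp hx)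
    simp [this, List.count_eq_zero_of_not_mem h]

lemma pvFlatten_pairwise (n : Char → Nat) : ∀ (ks : List Char), ks.Pairwise (· < ·) →
    (ks.flatMap fun k => List.replicate (n k) k).Pairwise (· ≤ ·) := by
  intro ks
  induction ks with
  | nil => simp
  | cons k kt ih =>
    intro hpw
    simp only [List.flatMap_cons]
    rw [List.pairwise_append]
    refine ⟨List.pairwise_replicate.mpr (Or.inr le_rfl), ih (List.pairwise_cons.mp hpw).2, ?_⟩
    intro a ha b hb
    have ha' : a = k := List.eq_of_mem_replicate ha
    rw [List.mem_flatMap] at hb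
    obtain ⟨j, hj, hbj⟩ := hb
    have hb' : b = j := List.eq_of_mem_replicate hbj
    subst ha'; subst hb'
    exact le_of_lt ((List.pairwise_cons.mp hpw).1 b hj)

lemma pvSorted_eq_flatten (L : List Char) :
    PySem.List.sorted L (fun x => x) false
      = ((PySem.List.sorted (PySem.Set.ofList L) (fun x => x) false)).flatMap
          fun k => List.replicate (L.count k) k := by
  apply PySem.List.sorted_id_eq_of_perm_of_pairwise
  · exact pvFlatten_perm L
  · exact pvFlatten_pairwise _ _ (PySem.List.sorted_ofList_pairwise_lt L)

-- ===== VERDICT (by name: the statement is the Claim_ definition above) =====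
theorem obtenerBuckets_spec : Claim_equal_obtenerBuckets := by
  intro T _
  unfold Spec_obtenerBuckets
  -- the counted dict is Dict.counter by PySem.Dict.foldl_insert_getD_add_one_eq_counter (rfl),
  -- so this restatement of the goal is definitional
  show (((PySem.List.sorted (PySem.Dict.counter T.toList).keys (fun x => x) false).foldl
      (fun (acc : List (String × Int × Int) × Int) c =>
        (acc.1 ++ [(String.ofList [c], acc.2, acc.2 + (PySem.Dict.counter T.toList).getD c 0)],
          acc.2 + (PySem.Dict.counter T.toList).getD c 0))
      ([], 0)).1)
    = pvGroupRuns 0 (PySem.List.sorted T.toList (fun x => x) false)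
  rw [PySem.Dict.keys_counter]
  have hfun : (fun (acc : List (String × Int × Int) × Int) c =>
      (acc.1 ++ [(String.ofList [c], acc.2, acc.2 + (PySem.Dict.counter T.toList).getD c 0)],
        acc.2 + (PySem.Dict.counter T.toList).getD c 0))
    = (fun (acc : List (String × Int × Int) × Int) c =>
      (acc.1 ++ [(String.ofList [c], acc.2, acc.2 + ((T.toList.count c : Nat) : Int))],
        acc.2 + ((T.toList.count c : Nat) : Int))) := by
    funext a c
    simp [PySem.Dict.getD_counter]
  rw [hfun, pvFoldA_eq (fun c => T.toList.count c), List.nil_append]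
  conv_rhs => rw [pvSorted_eq_flatten T.toList]
  refine (pvGroup_eq _ _ 0 (PySem.List.sorted_ofList_pairwise_lt T.toList) ?_).symm
  intro c hc
  rw [PySem.List.mem_sorted] at hc
  exact List.count_pos_iff.mpr ((PySem.Set.mem_ofList _ _).mp hc)
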